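-- pv_equiv track=rewrite | github.com/szijderveld/financial-document-assistant | backend/pdf_extractor.py | _merge_single_row_tables
-- ===== SOURCE A (Python) =====
-- def _merge_single_row_tables(
--     tables: list[list[list[str | None]]],
-- ) -> list[list[list[str | None]]]:
--     """Merge consecutive single-row tables into one multi-row table.
--
--     Financial PDFs sometimes have each row detected as a separate table.
--     """
--     if not tables:
--         return tables
--
--     merged: list[list[list[str | None]]] = []
--     current_group: list[list[str | None]] = []
--
--     for table in tables:
--         if len(table) == 1:
--             current_group.append(table[0])
--         else:
--             if current_group:
--                 merged.append(current_group)
--                 current_group = []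
--             merged.append(table)
--
--     if current_group:
--         merged.append(current_group)
--
--     return merged
-- ===== SOURCE B (Python) =====
-- def _merge_single_row_tables(
--     tables: list[list[list[str | None]]],
-- ) -> list[list[list[str | None]]]:
--     """Merge consecutive single-row tables into one multi-row table.
--
--     Run-scanning rewrite: advance an index over `tables`; on a single-row
--     table, scan the whole run of consecutive single-row tables and emit
--     them flattened as one merged table; otherwise emit the table as is.
--     """
--     out: list[list[list[str | None]]] = []
--     i = 0
--     n = len(tables)
--     while i < n:
--         if len(tables[i]) == 1:
--             j = i
--             while j < n and len(tables[j]) == 1: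
--                 j += 1
--             out.append([t[0] for t in tables[i:j]])
--             i = j
--         else:
--             out.append(tables[i])
--             i += 1
--     return out
-- ===== Notes on version B (the rewrite author's own statement) =====
-- stated objective: alternative
-- what changed: Replaced A's accumulator-and-flush pass (pending current_group flushed before non-single tables and after the loop) with an index-based run scanner that finds each maximal run of single-row tables and emits it flattened in one step.
import Mathlib
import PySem

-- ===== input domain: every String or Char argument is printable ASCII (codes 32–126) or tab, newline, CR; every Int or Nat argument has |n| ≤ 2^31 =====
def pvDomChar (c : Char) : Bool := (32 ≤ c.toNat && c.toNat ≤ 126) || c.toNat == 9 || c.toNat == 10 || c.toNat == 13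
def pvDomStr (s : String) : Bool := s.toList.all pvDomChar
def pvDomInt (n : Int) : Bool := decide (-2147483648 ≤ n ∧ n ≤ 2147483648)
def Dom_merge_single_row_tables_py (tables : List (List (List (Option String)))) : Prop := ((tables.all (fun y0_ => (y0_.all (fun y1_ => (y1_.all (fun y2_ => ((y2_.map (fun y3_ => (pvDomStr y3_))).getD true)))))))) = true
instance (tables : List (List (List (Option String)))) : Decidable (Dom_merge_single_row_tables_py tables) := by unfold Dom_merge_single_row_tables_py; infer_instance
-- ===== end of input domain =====

-- B is an alternative decomposition (run scanner) of A's accumulator-and-flush pass; same cost.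

-- ===== PORT A =====
-- A's loop: state = (merged, current_group); flush current_group before a non-single table and once after the loop.
def mergeStepA (st : List (List (List (Option String))) × List (List (Option String)))
    (table : List (List (Option String))) :
    List (List (List (Option String))) × List (List (Option String)) :=
  if table.length = 1 then
    (st.1, st.2 ++ [table.headI])
  else
    if st.2 ≠ [] then (st.1 ++ [st.2, table], [])
    else (st.1 ++ [table], st.2)

def merge_single_row_tables_py (tables : List (List (List (Option String)))) : List (List (List (Option String))) :=
  if tables = [] then tables
  else
    let st := tables.foldl mergeStepA ([], [])
    if st.2 ≠ [] then st.1 ++ [st.2] else st.1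

-- ===== PORT B =====
-- B's outer loop: on a single-row table, take the whole run of single-row tables at once
-- (tables[i:j] via span) and emit its first rows as one table; else emit the table unchanged.
def merge_single_row_tables_py_alt (tables : List (List (List (Option String)))) : List (List (List (Option String))) :=
  match tables with
  | [] => []
  | t :: rest =>
    if t.length = 1 then
      let p := rest.span (fun x => x.length == 1)
      (t.headI :: p.1.map List.headI) :: merge_single_row_tables_py_alt p.2
    else t :: merge_single_row_tables_py_alt rest
termination_by tables.length
decreasing_by
  · simp only [List.span_eq_takeWhile_dropWhile, List.length_cons]
    exact Nat.lt_succ_of_le (List.length_dropWhile_le _ _)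
  · simp

-- ===== PRECONDITION & SPEC =====
def Spec_merge_single_row_tables_py (tables : List (List (List (Option String)))) (out : List (List (List (Option String)))) : Prop := out = merge_single_row_tables_py_alt tables
instance (tables : List (List (List (Option String)))) (out : List (List (List (Option String)))) : Decidable (Spec_merge_single_row_tables_py tables out) := by unfold Spec_merge_single_row_tables_py; infer_instance

-- ===== CLAIM (what is proved, stated in full; the proofs are below) =====
def Claim_equal_merge_single_row_tables_py : Prop := ∀ (tables : List (List (List (Option String)))), Dom_merge_single_row_tables_py tables → Spec_merge_single_row_tables_py tables (merge_single_row_tables_py tables)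

-- ===== LEMMAS AND PROOFS =====

-- B's result when a non-empty group g of already-collected first rows is pending.
def goPending (g : List (List (Option String))) : List (List (List (Option String))) → List (List (List (Option String)))
  | [] => [g]
  | t :: rest =>
    if t.length = 1 then goPending (g ++ [t.headI]) rest
    else g :: t :: merge_single_row_tables_py_alt rest

theorem goPending_eq_span (g : List (List (Option String))) (ts : List (List (List (Option String)))) :
    goPending g ts =
      (g ++ (ts.takeWhile (fun x => x.length == 1)).map List.headI)
        :: merge_single_row_tables_py_alt (ts.dropWhile (fun x => x.length == 1)) := by
  induction ts generalizing g with
  | nil => simp [goPending, merge_single_row_tables_py_alt]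
  | cons t rest ih =>
    by_cases h : t.length = 1
    · simp [goPending, h, ih]
    · simp [goPending, h, merge_single_row_tables_py_alt]

theorem alt_cons_single (t : List (List (Option String))) (rest : List (List (List (Option String))))
    (h : t.length = 1) :
    merge_single_row_tables_py_alt (t :: rest) = goPending [t.headI] rest := by
  rw [merge_single_row_tables_py_alt, goPending_eq_span]
  simp [h, List.span_eq_takeWhile_dropWhile]

theorem mergeStepA_nonsingle (m : List (List (List (Option String)))) (g : List (List (Option String)))
    (t : List (List (Option String))) (h : ¬t.length = 1) :
    mergeStepA (m, g) t = if g = [] then (m ++ [t], g) else (m ++ [g, t], []) := by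
  by_cases hg : g = [] <;> simp [mergeStepA, h, hg]

theorem foldl_mergeStepA (ts : List (List (List (Option String))))
    (merged : List (List (List (Option String)))) (g : List (List (Option String))) :
    (let st := ts.foldl mergeStepA (merged, g)
     if st.2 ≠ [] then st.1 ++ [st.2] else st.1) =
      merged ++ (if g = [] then merge_single_row_tables_py_alt ts else goPending g ts) := by
  induction ts generalizing merged g with
  | nil =>
    by_cases hg : g = [] <;> simp [hg, merge_single_row_tables_py_alt, goPending]
  | cons t rest ih =>
    by_cases h : t.length = 1
    · have hne : g ++ [t.headI] ≠ [] := by simp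
      by_cases hg : g = []
      · simp only [List.foldl_cons, mergeStepA, h, if_true]
        rw [ih, alt_cons_single t rest h]
        simp [hg]
      · simp only [List.foldl_cons, mergeStepA, h, if_true]
        rw [ih]
        simp [hg, hne, goPending, h]
    · by_cases hg : g = []
      · simp only [List.foldl_cons, mergeStepA_nonsingle _ _ _ h, hg]
        rw [ih]
        simp [merge_single_row_tables_py_alt, h]
      · simp only [List.foldl_cons, mergeStepA_nonsingle _ _ _ h, if_neg hg]
        rw [ih]
        simp [goPending, h, hg]

-- ===== VERDICT (by name: the statement is the Claim_ definition above) =====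
theorem merge_single_row_tables_py_spec : Claim_equal_merge_single_row_tables_py := by
  intro tables _
  unfold Spec_merge_single_row_tables_py merge_single_row_tables_py
  by_cases h : tables = []
  · simp [h, merge_single_row_tables_py_alt]
  · simp only [h, if_false]
    have := foldl_mergeStepA tables [] []
    simp only [List.nil_append] at this
    exact this.symm ▸ rfl
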